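-- pv_equiv track=rewrite | github.com/cove/imago | vhs/vhs_pipeline/render_pipeline.py | local_bad_frames_to_repairs
-- ===== SOURCE A (Python) =====
-- BADFRAME_BRIDGE_ALWAYS_GAP = 0
--
-- BADFRAME_BRIDGE_SINGLETON_GAP = 0
--
-- def _merge_badframe_repairs(repairs):
--     if not repairs:
--         return []
--     repairs = sorted(repairs, key=lambda x: (x[0], x[1], -1 if x[2] is None else x[2]))
--     merged = [repairs[0]]
--     for a, b, src in repairs[1:]:
--         la, lb, lsrc = merged[-1]
--         if src == lsrc and a <= lb + 1:
--             merged[-1] = (la, max(lb, b), lsrc)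
--         else:
--             merged.append((a, b, src))
--     return merged
--
-- def _bridge_bad_ranges(ranges):
--     if not ranges:
--         return []
--     merged = [(int(ranges[0][0]), int(ranges[0][1]))]
--     for a_raw, b_raw in ranges[1:]:
--         a = int(a_raw)
--         b = int(b_raw)
--         la, lb = merged[-1]
--         gap = a - lb - 1
--         left_len = lb - la + 1
--         right_len = b - a + 1
--         should_bridge = False
--         if gap <= BADFRAME_BRIDGE_ALWAYS_GAP:
--             should_bridge = True
--         elif gap <= BADFRAME_BRIDGE_SINGLETON_GAP and (left_len == 1 or right_len == 1):
--             should_bridge = True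
--         if should_bridge:
--             merged[-1] = (la, max(lb, b))
--         else:
--             merged.append((a, b))
--     return merged
--
-- def local_bad_frames_to_repairs(local_bad_frames, max_frame=None):
--     frames = sorted({int(f) for f in (local_bad_frames or []) if int(f) >= 0})
--     if not frames:
--         return []
--     contiguous = []
--     start = prev = frames[0]
--     for f in frames[1:]:
--         if f == prev + 1:
--             prev = f
--             continue
--         contiguous.append((start, prev))
--         start = prev = f
--     contiguous.append((start, prev))
--     bridged = _bridge_bad_ranges(contiguous)
--     out = [(a, b, None) for a, b in bridged]
--     return _merge_badframe_repairs(out)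
-- ===== SOURCE B (Python) =====
-- def local_bad_frames_to_repairs(local_bad_frames, max_frame=None):
--     s = {int(f) for f in (local_bad_frames or []) if int(f) >= 0}
--     frames = sorted(s)
--     starts = [f for f in frames if f - 1 not in s]
--     ends = [f for f in frames if f + 1 not in s]
--     return [(a, b, None) for a, b in zip(starts, ends)]
-- ===== Notes on version B (the rewrite author's own statement) =====
-- stated objective: simpler
-- what changed: B finds run boundaries by set membership (keep f when f-1, resp. f+1, is not in the frame set) and zips the start list with the end list, replacing A's sequential run-building loop and dropping its bridge pass and its sort-and-merge pass, which are provably no-ops with both gap constants 0 and all sources None.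
import Mathlib
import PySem

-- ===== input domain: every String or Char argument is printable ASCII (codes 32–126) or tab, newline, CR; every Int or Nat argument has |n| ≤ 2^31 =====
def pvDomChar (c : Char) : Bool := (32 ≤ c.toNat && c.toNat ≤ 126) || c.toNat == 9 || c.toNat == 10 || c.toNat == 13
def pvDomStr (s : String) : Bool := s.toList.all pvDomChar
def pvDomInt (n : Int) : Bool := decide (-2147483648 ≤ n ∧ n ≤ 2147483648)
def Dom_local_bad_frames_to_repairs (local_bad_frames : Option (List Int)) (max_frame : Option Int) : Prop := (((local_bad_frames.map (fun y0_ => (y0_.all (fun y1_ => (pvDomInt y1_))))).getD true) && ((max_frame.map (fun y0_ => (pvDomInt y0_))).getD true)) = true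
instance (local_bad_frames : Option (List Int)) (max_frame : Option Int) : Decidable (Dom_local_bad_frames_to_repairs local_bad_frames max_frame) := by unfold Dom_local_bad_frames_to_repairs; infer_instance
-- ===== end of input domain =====

-- B detects run boundaries by set membership (f-1 / f+1 not in the frame set) and zips starts
-- with ends, instead of A's sequential run-building loop followed by its bridge and
-- sort-and-merge passes, which are no-ops here (both gap constants are 0, every source is None).
-- (objective: simpler)

-- ===== PORT A =====
def BADFRAME_BRIDGE_ALWAYS_GAP : Int := 0
def BADFRAME_BRIDGE_SINGLETON_GAP : Int := 0

-- the sort key of _merge_badframe_repairs: Python's lexicographic tuple order = Lex product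
def pvMergeKey (x : Int × Int × Option Int) : Int ×ₗ (Int ×ₗ Int) :=
  toLex (x.1, toLex (x.2.1, match x.2.2 with | none => -1 | some v => v))

-- the for-loop of _merge_badframe_repairs; Python's nonempty `merged` is acc ++ [last]
def mergeLoop : List (Int × Int × Option Int) → List (Int × Int × Option Int) →
    (Int × Int × Option Int) → List (Int × Int × Option Int)
  | [], acc, last => acc ++ [last]
  | (a, b, src) :: rest, acc, (la, lb, lsrc) =>
    if src = lsrc ∧ a ≤ lb + 1 then mergeLoop rest acc (la, max lb b, lsrc)
    else mergeLoop rest (acc ++ [(la, lb, lsrc)]) (a, b, src)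

def mergeBadframeRepairs (repairs : List (Int × Int × Option Int)) : List (Int × Int × Option Int) :=
  match repairs with
  | [] => []
  | _ :: _ =>
    match PySem.List.sorted repairs pvMergeKey false with
    | [] => []
    | r0 :: rest => mergeLoop rest [] r0

-- the for-loop of _bridge_bad_ranges; Python's nonempty `merged` is acc ++ [last]
def bridgeLoop : List (Int × Int) → List (Int × Int) → (Int × Int) → List (Int × Int)
  | [], acc, last => acc ++ [last]
  | (a, b) :: rest, acc, (la, lb) =>
    let gap := a - lb - 1
    let leftLen := lb - la + 1
    let rightLen := b - a + 1
    let shouldBridge : Bool :=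
      if gap ≤ BADFRAME_BRIDGE_ALWAYS_GAP then true
      else if gap ≤ BADFRAME_BRIDGE_SINGLETON_GAP ∧ (leftLen = 1 ∨ rightLen = 1) then true
      else false
    if shouldBridge then bridgeLoop rest acc (la, max lb b)
    else bridgeLoop rest (acc ++ [(la, lb)]) (a, b)

def bridgeBadRanges (ranges : List (Int × Int)) : List (Int × Int) :=
  match ranges with
  | [] => []
  | r0 :: rest => bridgeLoop rest [] (r0.1, r0.2)

-- the run-building loop of local_bad_frames_to_repairs; state (contiguous, start, prev)
def runLoop : List Int → List (Int × Int) → Int → Int → List (Int × Int)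
  | [], contiguous, start, prev => contiguous ++ [(start, prev)]
  | f :: rest, contiguous, start, prev =>
    if f = prev + 1 then runLoop rest contiguous start f
    else runLoop rest (contiguous ++ [(start, prev)]) f f

def local_bad_frames_to_repairs (local_bad_frames : Option (List Int)) (max_frame : Option Int) : List (Int × Int × Option Int) :=
  let frames := PySem.List.sorted
    (PySem.Set.ofList ((local_bad_frames.getD []).filter (fun f => decide (0 ≤ f))))
    (fun x => x) false
  match frames with
  | [] => []
  | f0 :: rest =>
    let contiguous := runLoop rest [] f0 f0
    let bridged := bridgeBadRanges contiguous
    let out := bridged.map (fun p => (p.1, p.2, (none : Option Int)))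
    mergeBadframeRepairs out

-- ===== PORT B =====
def local_bad_frames_to_repairs_alt (local_bad_frames : Option (List Int)) (max_frame : Option Int) : List (Int × Int × Option Int) :=
  let s := PySem.Set.ofList ((local_bad_frames.getD []).filter (fun f => decide (0 ≤ f)))
  let frames := PySem.List.sorted s (fun x => x) false
  let starts := frames.filter (fun f => !(PySem.Set.contains s (f - 1)))
  let ends := frames.filter (fun f => !(PySem.Set.contains s (f + 1)))
  (starts.zip ends).map (fun p => (p.1, p.2, (none : Option Int)))

-- ===== PRECONDITION & SPEC =====
def Spec_local_bad_frames_to_repairs (local_bad_frames : Option (List Int)) (max_frame : Option Int) (out : List (Int × Int × Option Int)) : Prop := out = local_bad_frames_to_repairs_alt local_bad_frames max_frame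
instance (local_bad_frames : Option (List Int)) (max_frame : Option Int) (out : List (Int × Int × Option Int)) : Decidable (Spec_local_bad_frames_to_repairs local_bad_frames max_frame out) := by unfold Spec_local_bad_frames_to_repairs; infer_instance

-- ===== CLAIM (what is proved, stated in full; the proofs are below) =====
def Claim_equal_local_bad_frames_to_repairs : Prop := ∀ (local_bad_frames : Option (List Int)) (max_frame : Option Int), Dom_local_bad_frames_to_repairs local_bad_frames max_frame → Spec_local_bad_frames_to_repairs local_bad_frames max_frame (local_bad_frames_to_repairs local_bad_frames max_frame)

-- ===== LEMMAS AND PROOFS =====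

-- accumulator-free form of runLoop
def runsGo (start prev : Int) : List Int → List (Int × Int)
  | [] => [(start, prev)]
  | f :: rest => if f = prev + 1 then runsGo start f rest else (start, prev) :: runsGo f f rest

-- local (previous-element) form of B's starts filter, tail part
def auxS (p : Int) : List Int → List Int
  | [] => []
  | f :: rest => if f = p + 1 then auxS f rest else f :: auxS f rest

-- local (previous-element) form of B's ends filter
def auxE (p : Int) : List Int → List Int
  | [] => [p]
  | f :: rest => if f = p + 1 then auxE f rest else p :: auxE f rest

theorem runLoop_eq (rest : List Int) : ∀ acc start prev,
    runLoop rest acc start prev = acc ++ runsGo start prev rest := by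
  induction rest with
  | nil => intro acc s p; simp [runLoop, runsGo]
  | cons f t ih =>
    intro acc s p
    by_cases h : f = p + 1 <;> simp [runLoop, runsGo, h, ih]

theorem runsGo_map_fst (rest : List Int) : ∀ s p,
    (runsGo s p rest).map Prod.fst = s :: auxS p rest := by
  induction rest with
  | nil => intro s p; simp [runsGo, auxS]
  | cons f t ih =>
    intro s p
    by_cases h : f = p + 1 <;> simp [runsGo, auxS, h, ih]

theorem runsGo_map_snd (rest : List Int) : ∀ s p,
    (runsGo s p rest).map Prod.snd = auxE p rest := by
  induction rest with
  | nil => intro s p; simp [runsGo, auxE]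
  | cons f t ih =>
    intro s p
    by_cases h : f = p + 1 <;> simp [runsGo, auxE, h, ih]

theorem runsGo_head (rest : List Int) : ∀ s p, ∃ q gs, runsGo s p rest = (s, q) :: gs := by
  induction rest with
  | nil => intro s p; exact ⟨p, [], rfl⟩
  | cons f t ih =>
    intro s p
    by_cases h : f = p + 1
    · subst h
      obtain ⟨q, gs, hq⟩ := ih s (p + 1)
      exact ⟨q, gs, by simp [runsGo, hq]⟩
    · exact ⟨p, runsGo f f t, by simp [runsGo, h]⟩

-- goodness of run lists: starts ≤ ends, and a gap ≥ 2 between consecutive runs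
theorem runsGo_good (rest : List Int) : ∀ s p, s ≤ p → List.IsChain (· < ·) (p :: rest) →
    (List.IsChain (fun a b : Int × Int => a.2 + 2 ≤ b.1) (runsGo s p rest) ∧
      ∀ x ∈ runsGo s p rest, x.1 ≤ x.2) := by
  induction rest with
  | nil => intro s p hsp _; simp [runsGo]; exact hsp
  | cons f t ih =>
    intro s p hsp hc
    rw [List.isChain_cons_cons] at hc
    obtain ⟨hpf, hc'⟩ := hc
    by_cases h : f = p + 1
    · have := ih s f (by omega) hc'
      simpa [runsGo, h] using this
    · have hgap : p + 2 ≤ f := by omega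
      have ihres := ih f f le_rfl hc'
      obtain ⟨q, gs, hq⟩ := runsGo_head t f f
      constructor
      · simp only [runsGo, h, if_false, hq]
        rw [List.isChain_cons_cons]
        exact ⟨by simpa using hgap, by rw [hq] at ihres; exact ihres.1⟩
      · intro x hx
        simp only [runsGo, h, if_false, List.mem_cons] at hx
        rcases hx with hx | hx
        · subst hx; exact hsp
        · exact ihres.2 x hx

-- bridge is the identity on a run list with gaps ≥ 2
theorem bridgeLoop_id (rest : List (Int × Int)) : ∀ acc last,
    List.IsChain (fun a b : Int × Int => a.2 + 2 ≤ b.1) (last :: rest) →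
    bridgeLoop rest acc last = acc ++ last :: rest := by
  induction rest with
  | nil => intro acc last _; rfl
  | cons r t ih =>
    intro acc last hc
    obtain ⟨a, b⟩ := r
    obtain ⟨la, lb⟩ := last
    rw [List.isChain_cons_cons] at hc
    obtain ⟨hgap, hc'⟩ := hc
    simp only at hgap
    have hb : ¬ (a - lb - 1 ≤ BADFRAME_BRIDGE_ALWAYS_GAP) := by
      simp only [BADFRAME_BRIDGE_ALWAYS_GAP]; omega
    have hb2 : ¬ (a - lb - 1 ≤ BADFRAME_BRIDGE_SINGLETON_GAP ∧ (lb - la + 1 = 1 ∨ b - a + 1 = 1)) := by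
      simp only [BADFRAME_BRIDGE_SINGLETON_GAP]
      rintro ⟨h1, _⟩; omega
    simp only [bridgeLoop, hb, if_false, hb2, Bool.false_eq_true, ite_false]
    rw [ih (acc ++ [(la, lb)]) (a, b) hc']
    simp

-- merge loop is the identity when no entry can merge with its predecessor
theorem mergeLoop_id (rest : List (Int × Int × Option Int)) : ∀ acc last,
    List.IsChain (fun a b : Int × Int × Option Int => a.2.1 + 2 ≤ b.1) (last :: rest) →
    mergeLoop rest acc last = acc ++ last :: rest := by
  induction rest with
  | nil => intro acc last _; rfl
  | cons r t ih =>
    intro acc last hc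
    obtain ⟨a, b, src⟩ := r
    obtain ⟨la, lb, lsrc⟩ := last
    rw [List.isChain_cons_cons] at hc
    obtain ⟨hgap, hc'⟩ := hc
    simp only at hgap
    have hcond : ¬ (src = lsrc ∧ a ≤ lb + 1) := by rintro ⟨_, h2⟩; omega
    simp only [mergeLoop, hcond, if_false]
    rw [ih (acc ++ [(la, lb, lsrc)]) (a, b, src) hc']
    simp

-- chain with gaps ≥ 2 plus within-run bounds gives strictly increasing starts, pairwise
theorem chain_to_pairwise_fst (rs : List (Int × Int))
    (hc : List.IsChain (fun a b : Int × Int => a.2 + 2 ≤ b.1) rs)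
    (hle : ∀ x ∈ rs, x.1 ≤ x.2) :
    List.Pairwise (fun a b : Int × Int => a.1 < b.1 ∧ a.2 < b.1) rs := by
  induction rs with
  | nil => simp
  | cons x t ih =>
    have ihp := ih (List.IsChain.of_cons hc) (fun y hy => hle y (List.mem_cons_of_mem _ hy))
    refine List.pairwise_cons.mpr ⟨?_, ihp⟩
    intro y hy
    cases t with
    | nil => simp at hy
    | cons z zs =>
      rw [List.isChain_cons_cons] at hc
      have hxz : x.2 + 2 ≤ z.1 := hc.1
      have hxx : x.1 ≤ x.2 := hle x (by simp)
      rcases List.mem_cons.mp hy with rfl | hy'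
      · exact ⟨by omega, by omega⟩
      · have hz : z.1 ≤ z.2 := hle z (by simp)
        have hzy := (List.pairwise_cons.mp ihp).1 y hy'
        exact ⟨by omega, by omega⟩

-- merge of a good run list (with none sources) is the identity
theorem merge_id (rs : List (Int × Int))
    (hc : List.IsChain (fun a b : Int × Int => a.2 + 2 ≤ b.1) rs)
    (hle : ∀ x ∈ rs, x.1 ≤ x.2) :
    mergeBadframeRepairs (rs.map (fun p => (p.1, p.2, (none : Option Int)))) =
      rs.map (fun p => (p.1, p.2, (none : Option Int))) := by
  cases rs with
  | nil => rfl
  | cons r t =>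
    have hcm : List.IsChain (fun a b : Int × Int × Option Int => a.2.1 + 2 ≤ b.1)
        ((r :: t).map (fun p => (p.1, p.2, (none : Option Int)))) :=
      by rw [List.isChain_map]; exact hc
    have hpw := chain_to_pairwise_fst (r :: t) hc hle
    have hkey : ((r :: t).map (fun p => (p.1, p.2, (none : Option Int)))).Pairwise
        (fun a b => pvMergeKey a < pvMergeKey b) := by
      rw [List.pairwise_map]
      refine hpw.imp ?_
      intro a b hab
      show pvMergeKey _ < pvMergeKey _
      unfold pvMergeKey
      rw [Prod.Lex.lt_iff]
      left
      exact hab.1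
    have hsorted : PySem.List.sorted ((r :: t).map (fun p => (p.1, p.2, (none : Option Int))))
        pvMergeKey false = (r :: t).map (fun p => (p.1, p.2, (none : Option Int))) :=
      PySem.List.sorted_eq_of_perm_of_pairwise_lt _ _ _ (List.Perm.refl _) hkey
    simp only [List.map_cons] at hsorted hcm ⊢
    simp only [mergeBadframeRepairs, hsorted]
    rw [mergeLoop_id _ _ _ hcm]
    simp

-- B's starts filter over the whole frame list equals the local previous-element filter
theorem filterS (L : List Int) (t : List Int) : ∀ p, List.IsChain (· < ·) (p :: t) →
    (∀ y ∈ L, y ≤ p ∨ y ∈ t) → (∀ y ∈ t, y ∈ L) → p ∈ L →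
    t.filter (fun f => !(decide ((f - 1) ∈ L))) = auxS p t := by
  induction t with
  | nil => intro p _ _ _ _; rfl
  | cons f t' ih =>
    intro p hc h2 h4 h3
    rw [List.isChain_cons_cons] at hc
    obtain ⟨hpf, hc'⟩ := hc
    have hft' : ∀ y ∈ t', f < y := by
      have := List.isChain_iff_pairwise.mp hc'
      exact (List.pairwise_cons.mp this).1
    have h2' : ∀ y ∈ L, y ≤ f ∨ y ∈ t' := by
      intro y hy
      rcases h2 y hy with hl | hl
      · exact Or.inl (by omega)
      · rcases List.mem_cons.mp hl with rfl | hl'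
        · exact Or.inl le_rfl
        · exact Or.inr hl'
    have h4' : ∀ y ∈ t', y ∈ L := fun y hy => h4 y (List.mem_cons_of_mem _ hy)
    have h3' : f ∈ L := h4 f (by simp)
    have hrec := ih f hc' h2' h4' h3'
    by_cases h : f = p + 1
    · subst h
      simp only [List.filter_cons, auxS, if_pos rfl]
      have : p + 1 - 1 = p := by omega
      rw [this]
      simp only [h3, decide_true, Bool.not_true, Bool.false_eq_true, ite_false]
      exact hrec
    · have hmem : (f - 1) ∉ L := by
        intro hm
        rcases h2 (f - 1) hm with hl | hl
        · omega
        · rcases List.mem_cons.mp hl with he | hl'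
          · omega
          · have := hft' _ hl'; omega
      simp only [List.filter_cons, hmem, decide_false, Bool.not_false, auxS, h,
        Bool.false_eq_true, ite_false, ite_true]
      rw [hrec]

-- B's ends filter over the whole frame list equals the local next-element filter
theorem filterE (L : List Int) (t : List Int) : ∀ p, List.IsChain (· < ·) (p :: t) →
    (∀ y ∈ L, y ≤ p ∨ y ∈ t) → (∀ y ∈ t, y ∈ L) →
    (p :: t).filter (fun f => !(decide ((f + 1) ∈ L))) = auxE p t := by
  induction t with
  | nil =>
    intro p _ h2 _
    have hmem : (p + 1) ∉ L := by
      intro hm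
      rcases h2 (p + 1) hm with hl | hl
      · omega
      · simp at hl
    simp [List.filter_cons, hmem, auxE]
  | cons f t' ih =>
    intro p hc h2 h4
    rw [List.isChain_cons_cons] at hc
    obtain ⟨hpf, hc'⟩ := hc
    have hft' : ∀ y ∈ t', f < y := by
      have := List.isChain_iff_pairwise.mp hc'
      exact (List.pairwise_cons.mp this).1
    have h2' : ∀ y ∈ L, y ≤ f ∨ y ∈ t' := by
      intro y hy
      rcases h2 y hy with hl | hl
      · exact Or.inl (by omega)
      · rcases List.mem_cons.mp hl with rfl | hl'
        · exact Or.inl le_rfl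
        · exact Or.inr hl'
    have h4' : ∀ y ∈ t', y ∈ L := fun y hy => h4 y (List.mem_cons_of_mem _ hy)
    have hrec := ih f hc' h2' h4'
    by_cases h : f = p + 1
    · subst h
      have hmem : (p + 1) ∈ L := h4 (p + 1) (by simp)
      simp only [List.filter_cons, auxE, hmem, decide_true, Bool.not_true,
        Bool.false_eq_true, ite_false]
      simpa [List.filter_cons] using hrec
    · have hmem : (p + 1) ∉ L := by
        intro hm
        rcases h2 (p + 1) hm with hl | hl
        · omega
        · rcases List.mem_cons.mp hl with he | hl'
          · omega
          · have := hft' _ hl'; omega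
      rw [show ((p :: f :: t').filter (fun f => !(decide ((f + 1) ∈ L)))) =
          p :: ((f :: t').filter (fun f => !(decide ((f + 1) ∈ L)))) from by
            simp [List.filter_cons, hmem], hrec]
      simp [auxE, h]

-- the shared core: A's pipeline equals B's zip of boundary filters, over any set s
theorem core (s : List Int)
    (hpw0 : (PySem.List.sorted s (fun x => x) false).Pairwise (· < ·)) :
    (match PySem.List.sorted s (fun x => x) false with
      | [] => ([] : List (Int × Int × Option Int))
      | f0 :: rest =>
        mergeBadframeRepairs ((bridgeBadRanges (runLoop rest [] f0 f0)).map
          (fun p => (p.1, p.2, (none : Option Int))))) =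
    (((PySem.List.sorted s (fun x => x) false).filter (fun f => !(PySem.Set.contains s (f - 1)))).zip
      ((PySem.List.sorted s (fun x => x) false).filter (fun f => !(PySem.Set.contains s (f + 1))))).map
      (fun p => (p.1, p.2, (none : Option Int))) := by
  have hmem0 : ∀ x : Int, x ∈ PySem.List.sorted s (fun x => x) false ↔ x ∈ s :=
    fun x => PySem.List.mem_sorted s (fun x => x) false x
  cases hf : PySem.List.sorted s (fun x => x) false with
  | nil => rfl
  | cons f0 rest =>
    have hmemLs : ∀ x : Int, x ∈ f0 :: rest ↔ x ∈ s := fun x => hf ▸ hmem0 x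
    have hpw : (f0 :: rest).Pairwise (· < ·) := hf ▸ hpw0
    have hch : (f0 :: rest).IsChain (· < ·) := List.isChain_iff_pairwise.mpr hpw
    have hcontains : ∀ (x : Int), PySem.Set.contains s x = decide (x ∈ f0 :: rest) := by
      intro x
      show s.contains x = decide (x ∈ f0 :: rest)
      by_cases hx : x ∈ s
      · simp [hx, (hmemLs x).mpr hx]
      · have hnx : ¬ x ∈ f0 :: rest := fun hm => hx ((hmemLs x).mp hm)
        simp [hx, hnx]
    have hfeq : ∀ (g : Int → Int),
        (f0 :: rest).filter (fun f => !(PySem.Set.contains s (g f))) =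
        (f0 :: rest).filter (fun f => !(decide ((g f) ∈ f0 :: rest))) := by
      intro g
      apply List.filter_congr
      intro x _
      rw [hcontains]
    show mergeBadframeRepairs ((bridgeBadRanges (runLoop rest [] f0 f0)).map
        (fun p => (p.1, p.2, (none : Option Int)))) = _
    -- A side
    rw [runLoop_eq rest [] f0 f0, List.nil_append]
    have hgood := runsGo_good rest f0 f0 le_rfl hch
    obtain ⟨q, gs, hq⟩ := runsGo_head rest f0 f0
    have hbr : bridgeBadRanges (runsGo f0 f0 rest) = runsGo f0 f0 rest := by
      rw [hq]
      show bridgeLoop gs [] ((f0, q).1, (f0, q).2) = (f0, q) :: gs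
      rw [bridgeLoop_id gs [] (f0, q) (by rw [← hq]; exact hgood.1)]
      rfl
    rw [hbr, merge_id _ hgood.1 hgood.2]
    -- B side
    rw [hfeq (fun f => f - 1), hfeq (fun f => f + 1)]
    have hhead : (f0 - 1) ∉ f0 :: rest := by
      intro hm
      rcases List.mem_cons.mp hm with he | hm'
      · omega
      · have := (List.pairwise_cons.mp hpw).1 _ hm'; omega
    have h2 : ∀ y ∈ f0 :: rest, y ≤ f0 ∨ y ∈ rest := by
      intro y hy
      rcases List.mem_cons.mp hy with rfl | hy'
      · exact Or.inl le_rfl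
      · exact Or.inr hy'
    have h4 : ∀ y ∈ rest, y ∈ f0 :: rest := fun y hy => List.mem_cons_of_mem _ hy
    have hstarts : (f0 :: rest).filter (fun f => !(decide ((f - 1) ∈ f0 :: rest))) =
        f0 :: auxS f0 rest := by
      rw [List.filter_cons]
      simp only [hhead, decide_false, Bool.not_false, ite_true]
      rw [filterS (f0 :: rest) rest f0 hch h2 h4 (by simp)]
    have hends : (f0 :: rest).filter (fun f => !(decide ((f + 1) ∈ f0 :: rest))) =
        auxE f0 rest :=
      filterE (f0 :: rest) rest f0 hch h2 h4
    rw [hstarts, hends, ← runsGo_map_fst, ← runsGo_map_snd]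
    rw [(List.zip_of_prod rfl rfl).symm]

-- ===== VERDICT (by name: the statement is the Claim_ definition above) =====
theorem local_bad_frames_to_repairs_spec : Claim_equal_local_bad_frames_to_repairs := by
  intro lbf mf _
  show local_bad_frames_to_repairs lbf mf = local_bad_frames_to_repairs_alt lbf mf
  exact core _ (PySem.List.sorted_ofList_pairwise_lt _)
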